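-- pv_equiv track=rewrite | github.com/ilialecha/Programming_1 | Lists/List_8/chain7.py | short_power7_chains
-- ===== SOURCE A (Python) =====
-- def is_power7(n):
--     p=0
--     if n == 0:
--         return False
--     while n != 1:
--         if n%7 != 0:
--             return False
--         n = n//7
--         p+=1
--     return True
--
-- def short_power7_chains(f,k):
--     c=0
--     for n in f:
--         if is_power7(n) and c<k: c+=1
--         elif not is_power7(n): c = 0
--         else:
--             return False
--     return True
-- ===== SOURCE B (Python) =====
-- def is_power7(n):
--     p = 1
--     while p < n:
--         p *= 7
--     return p == n
--
-- def short_power7_chains(f, k):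
--     it = iter(f)
--     for n in it:
--         if is_power7(n):
--             run = 1
--             for m in it:
--                 if is_power7(m):
--                     run += 1
--                 else:
--                     break
--             if run > k:
--                 return False
--     return True
-- ===== Notes on version B (the rewrite author's own statement) =====
-- stated objective: alternative
-- what changed: B tests powers of 7 by multiplying upward (p *= 7 until p >= n) instead of repeatedly dividing by 7, and detects long chains by scanning each maximal run of powers to completion over a shared iterator and comparing its length to k, instead of A's capped running counter with a three-way branch.
import Mathlib
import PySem

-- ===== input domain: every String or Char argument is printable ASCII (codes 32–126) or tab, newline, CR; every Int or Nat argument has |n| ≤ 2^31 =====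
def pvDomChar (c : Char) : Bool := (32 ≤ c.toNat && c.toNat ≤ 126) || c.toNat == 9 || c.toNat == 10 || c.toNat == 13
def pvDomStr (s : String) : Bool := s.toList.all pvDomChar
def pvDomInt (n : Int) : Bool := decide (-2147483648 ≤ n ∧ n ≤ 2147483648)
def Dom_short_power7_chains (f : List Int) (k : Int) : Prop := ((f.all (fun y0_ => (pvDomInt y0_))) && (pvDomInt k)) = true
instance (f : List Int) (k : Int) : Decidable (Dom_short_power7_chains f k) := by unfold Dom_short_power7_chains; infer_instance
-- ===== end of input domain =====

-- B is an alternative of the same cost: it tests powers of 7 by multiplying up instead of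
-- dividing down, and scans whole maximal runs of powers (comparing each run length to k)
-- instead of maintaining a capped running counter with a three-way branch.

-- ===== PORT A =====
-- the `while n != 1` loop of A's is_power7 (the dead counter p is omitted; `fuel` is only
-- a totality guard — the caller passes n.natAbs + 1, enough for every iteration Python runs)
def isPower7Loop (fuel : Nat) (n : Int) : Bool :=
  match fuel with
  | 0 => false
  | fuel + 1 =>
    if n = 1 then true
    else if PySem.Int.mod n 7 ≠ 0 then false
    else isPower7Loop fuel (PySem.Int.floordiv n 7)

def is_power7 (n : Int) : Bool :=
  if n = 0 then false else isPower7Loop (n.natAbs + 1) n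

def aChainLoop (f : List Int) (k c : Int) : Bool :=
  match f with
  | [] => true
  | n :: t =>
    if is_power7 n && decide (c < k) then aChainLoop t k (c + 1)
    else if !(is_power7 n) then aChainLoop t k 0
    else false

def short_power7_chains (f : List Int) (k : Int) : Bool := aChainLoop f k 0

-- ===== PORT B =====
-- the `while p < n: p *= 7` loop of B's is_power7 (`fuel` is only a totality guard; the
-- caller passes (n - 1).toNat + 1, enough for every iteration Python runs)
def pow7Up (fuel : Nat) (n p : Int) : Int :=
  match fuel with
  | 0 => p
  | fuel + 1 => if p < n then pow7Up fuel n (p * 7) else p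

def is_power7_alt (n : Int) : Bool := pow7Up ((n - 1).toNat + 1) n 1 == n

-- B's two nested `for … in it` loops over the shared iterator `it`, transcribed as one
-- structural pass over the list: state `none` = in the outer loop, state `some run` = in
-- the inner loop having counted `run` powers of the current maximal run
def bLoop (f : List Int) (k : Int) (st : Option Int) : Bool :=
  match f, st with
  | [], none => true
  | [], some run => if run > k then false else true
  | n :: t, none => if is_power7_alt n then bLoop t k (some 1) else bLoop t k none
  | m :: t, some run =>
    if is_power7_alt m then bLoop t k (some (run + 1))
    else if run > k then false else bLoop t k none

def short_power7_chains_alt (f : List Int) (k : Int) : Bool := bLoop f k none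

-- ===== PRECONDITION & SPEC =====
def Spec_short_power7_chains (f : List Int) (k : Int) (out : Bool) : Prop := out = short_power7_chains_alt f k
instance (f : List Int) (k : Int) (out : Bool) : Decidable (Spec_short_power7_chains f k out) := by unfold Spec_short_power7_chains; infer_instance

-- ===== CLAIM (what is proved, stated in full; the proofs are below) =====
def Claim_equal_short_power7_chains : Prop := ∀ (f : List Int) (k : Int), Dom_short_power7_chains f k → Spec_short_power7_chains f k (short_power7_chains f k)

-- ===== LEMMAS AND PROOFS =====

theorem isPower7Loop_iff : ∀ (fuel : Nat) (n : Int), n ≠ 0 → n.natAbs < fuel →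
    (isPower7Loop fuel n = true ↔ ∃ e : ℕ, n = 7 ^ e) := by
  intro fuel
  induction fuel with
  | zero => intro n h0 hf; omega
  | succ fuel ih =>
    intro n h0 hf
    rw [isPower7Loop]
    by_cases h1 : n = 1
    · rw [if_pos h1]
      simp only [true_iff]
      exact ⟨0, by simpa using h1⟩
    · rw [if_neg h1]
      by_cases hmod : PySem.Int.mod n 7 = 0
      · rw [if_neg (by simpa using hmod)]
        obtain ⟨q, rfl⟩ := (PySem.Int.mod_eq_zero_iff_dvd n 7).mp hmod
        have hq : q ≠ 0 := by rintro rfl; simp at h0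
        have hfq : PySem.Int.floordiv (7 * q) 7 = q := by
          rw [PySem.Int.floordiv_eq_ediv_of_pos (by norm_num)]
          exact Int.mul_ediv_cancel_left q (by norm_num)
        rw [hfq, ih q hq (by omega)]
        constructor
        · rintro ⟨e, rfl⟩; exact ⟨e + 1, by ring⟩
        · rintro ⟨e, he⟩
          cases e with
          | zero => simp at he; omega
          | succ e =>
            refine ⟨e, ?_⟩
            have h7 : (7:Int) * q = 7 * 7 ^ e := by rw [he]; ring
            exact mul_left_cancel₀ (by norm_num) h7
      · rw [if_pos (by simpa using hmod)]
        simp only [Bool.false_eq_true, false_iff]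
        rintro ⟨e, rfl⟩
        apply hmod
        have he : e ≠ 0 := by rintro rfl; simp at h1
        exact (PySem.Int.mod_eq_zero_iff_dvd _ 7).mpr (dvd_pow_self 7 he)

theorem pow7Up_eq : ∀ (fuel : Nat) (n p : Int), 0 < p → (n - p).toNat < fuel →
    (pow7Up fuel n p = n ↔ ∃ j : ℕ, n = p * 7 ^ j) := by
  intro fuel
  induction fuel with
  | zero => intro n p hp hf; omega
  | succ fuel ih =>
    intro n p hp hf
    rw [pow7Up]
    split
    · rename_i hlt
      rw [ih n (p * 7) (by positivity) (by omega)]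
      constructor
      · rintro ⟨j, rfl⟩; exact ⟨j + 1, by ring⟩
      · rintro ⟨j, hj⟩
        cases j with
        | zero => simp at hj; omega
        | succ j => exact ⟨j, by rw [hj]; ring⟩
    · rename_i hge
      rw [not_lt] at hge
      constructor
      · intro h; exact ⟨0, by simp [← h]⟩
      · rintro ⟨j, rfl⟩
        have h7 : (1:Int) ≤ 7 ^ j := one_le_pow₀ (by norm_num)
        exact le_antisymm (le_mul_of_one_le_right hp.le h7) hge

theorem is_power7_iff (n : Int) : is_power7 n = true ↔ ∃ e : ℕ, n = 7 ^ e := by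
  unfold is_power7
  by_cases h0 : n = 0
  · rw [if_pos h0]
    simp only [Bool.false_eq_true, false_iff]
    rintro ⟨e, he⟩
    have : (0:Int) < 7 ^ e := by positivity
    omega
  · rw [if_neg h0]
    exact isPower7Loop_iff (n.natAbs + 1) n h0 (by omega)

theorem is_power7_alt_iff (n : Int) : is_power7_alt n = true ↔ ∃ e : ℕ, n = 7 ^ e := by
  unfold is_power7_alt
  rw [beq_iff_eq, pow7Up_eq ((n - 1).toNat + 1) n 1 (by norm_num) (by omega)]
  simp

theorem isp_eq (n : Int) : is_power7 n = is_power7_alt n := by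
  have h1 := is_power7_iff n
  have h2 := is_power7_alt_iff n
  cases ha : is_power7 n <;> cases hb : is_power7_alt n <;> simp_all

theorem bLoop_gt : ∀ (l : List Int) (k run : Int), k < run → bLoop l k (some run) = false := by
  intro l
  induction l with
  | nil => intro k run h; rw [bLoop, if_pos (by omega)]
  | cons m t ih =>
    intro k run h
    rw [bLoop]
    cases hm : is_power7_alt m
    · simp only [Bool.false_eq_true]
      rw [if_neg (by simp), if_pos (by omega)]
    · rw [if_pos rfl]
      exact ih k (run + 1) (by omega)

theorem chain_main : ∀ (l : List Int),
    (∀ k : Int, aChainLoop l k 0 = bLoop l k none) ∧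
    (∀ k c : Int, 0 ≤ c → c ≤ k → aChainLoop l k c = bLoop l k (some c)) := by
  intro l
  induction l with
  | nil =>
    refine ⟨fun k => by rw [bLoop]; rfl, fun k c h0 hk => ?_⟩
    rw [bLoop, if_neg (by omega)]
    rfl
  | cons n t ih =>
    obtain ⟨ihP, ihQ⟩ := ih
    have step : ∀ (k c : Int), aChainLoop (n :: t) k c =
        (if is_power7_alt n = true then
          (if c < k then aChainLoop t k (c + 1) else false)
        else aChainLoop t k 0) := by
      intro k c
      show (if (is_power7 n && decide (c < k)) = true then aChainLoop t k (c + 1)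
            else if (!(is_power7 n)) = true then aChainLoop t k 0 else false) = _
      rw [isp_eq]
      cases hp : is_power7_alt n <;> simp
    constructor
    · intro k
      rw [step k 0, bLoop]
      cases hp : is_power7_alt n
      · rw [if_neg (by simp), if_neg (by simp)]
        exact ihP k
      · rw [if_pos rfl, if_pos rfl]
        by_cases hk : (0:Int) < k
        · rw [if_pos hk]
          exact ihQ k 1 (by omega) (by omega)
        · rw [if_neg hk]
          exact (bLoop_gt t k 1 (by omega)).symm
    · intro k c h0 hk
      rw [step k c, bLoop]
      cases hp : is_power7_alt n
      · rw [if_neg (by simp), if_neg (by simp), if_neg (by omega)]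
        exact ihP k
      · rw [if_pos rfl, if_pos rfl]
        by_cases hc : c < k
        · rw [if_pos hc]
          exact ihQ k (c + 1) (by omega) (by omega)
        · rw [if_neg hc]
          exact (bLoop_gt t k (c + 1) (by omega)).symm

-- ===== VERDICT (by name: the statement is the Claim_ definition above) =====
theorem short_power7_chains_spec : Claim_equal_short_power7_chains := by
  intro f k _
  unfold Spec_short_power7_chains short_power7_chains short_power7_chains_alt
  exact (chain_main f).1 k
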